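-- pv_equiv track=rewrite | github.com/rafaelvareto/HPLS-HFCN-openset | python/descriptor_aux.py | find_variations
-- ===== SOURCE A (Python) =====
-- def find_variations(pixel_values):
--     prev = pixel_values[-1]
--     t = 0
--     for p in range(0, len(pixel_values)):
--         cur = pixel_values[p]
--         if cur != prev:
--             t += 1
--         prev = cur
--     return t
-- ===== SOURCE B (Python) =====
-- from itertools import groupby
--
-- def find_variations(pixel_values):
--     last = pixel_values[-1]          # raises IndexError on [] like the original
--     runs = sum(1 for _key, _grp in groupby(pixel_values))
--     return runs - 1 + (1 if pixel_values[0] != last else 0)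
-- ===== Notes on version B (the rewrite author's own statement) =====
-- stated objective: alternative
-- what changed: Replaces the running-prev counter loop by run-length grouping: itertools.groupby counts maximal equal-value runs r, then the circular transition count is r-1 plus one wrap-around adjustment for the first/last pair.
import Mathlib
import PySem

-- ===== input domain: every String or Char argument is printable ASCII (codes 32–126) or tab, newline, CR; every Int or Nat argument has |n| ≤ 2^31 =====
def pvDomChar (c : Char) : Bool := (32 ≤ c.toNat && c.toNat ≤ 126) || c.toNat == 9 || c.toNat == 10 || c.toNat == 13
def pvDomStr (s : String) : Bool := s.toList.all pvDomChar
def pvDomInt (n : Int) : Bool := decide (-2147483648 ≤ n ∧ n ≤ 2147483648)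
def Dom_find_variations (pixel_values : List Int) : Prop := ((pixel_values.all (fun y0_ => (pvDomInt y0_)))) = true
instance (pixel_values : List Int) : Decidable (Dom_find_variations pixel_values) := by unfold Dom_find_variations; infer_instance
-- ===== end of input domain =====

-- B replaces A's running-prev counter loop by run-length grouping (count maximal equal runs, then
-- one wrap-around adjustment); equivalence on nonempty lists (both raise IndexError on []).

-- ===== PORT A =====
-- the for-loop over range(len(xs)) reading xs[p] visits exactly the elements in order; state is (prev, t)
def find_variations (pixel_values : List Int) : Int :=
  let prev0 : Int := (PySem.List.pyGet? pixel_values (-1)).getD 0  -- IndexError on []: excluded by Pre_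
  (pixel_values.foldl (fun (s : Int × Int) cur => (cur, if cur ≠ s.1 then s.2 + 1 else s.2)) (prev0, 0)).2

-- ===== PORT B =====
-- itertools.groupby group counting: number of maximal runs of equal consecutive values
def fvRuns : List Int → Int
  | [] => 0
  | [_] => 1
  | a :: b :: tl => (if a = b then 0 else 1) + fvRuns (b :: tl)

def find_variations_alt (pixel_values : List Int) : Int :=
  let last : Int := (PySem.List.pyGet? pixel_values (-1)).getD 0  -- IndexError on []: excluded by Pre_
  let runs : Int := fvRuns pixel_values
  runs - 1 + (if (PySem.List.pyGet? pixel_values 0).getD 0 ≠ last then 1 else 0)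

-- ===== PRECONDITION & SPEC =====
-- A raises IndexError on the empty list (pixel_values[-1]); B raises there too.
def Pre_find_variations (pixel_values : List Int) : Prop := pixel_values ≠ []
instance (pixel_values : List Int) : Decidable (Pre_find_variations pixel_values) := by unfold Pre_find_variations; infer_instance
def pvWitness_find_variations : List Int := [1, 1, 2, 1]

def Spec_find_variations (pixel_values : List Int) (out : Int) : Prop := out = find_variations_alt pixel_values
instance (pixel_values : List Int) (out : Int) : Decidable (Spec_find_variations pixel_values out) := by unfold Spec_find_variations; infer_instance

-- ===== CLAIM (what is proved, stated in full; the proofs are below) =====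
def Claim_equal_find_variations : Prop := ∀ (pixel_values : List Int), Dom_find_variations pixel_values → Pre_find_variations pixel_values → Spec_find_variations pixel_values (find_variations pixel_values)

-- ===== LEMMAS AND PROOFS =====

-- loop characterisation: A's fold from seed (prev, t) over a :: rest equals t plus the
-- head-vs-prev indicator plus the run count of a :: rest minus 1 (= linear transitions)
theorem fv_fold_eq (a : Int) (rest : List Int) : ∀ (prev t : Int),
    ((a :: rest).foldl (fun (s : Int × Int) cur => (cur, if cur ≠ s.1 then s.2 + 1 else s.2)) (prev, t)).2
      = t + (if a ≠ prev then (1 : Int) else 0) + (fvRuns (a :: rest) - 1) := by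
  induction rest generalizing a with
  | nil => intro prev t; simp [List.foldl, fvRuns]; split_ifs <;> ring
  | cons b tl ih =>
      intro prev t
      have step : ((a :: b :: tl).foldl (fun (s : Int × Int) cur => (cur, if cur ≠ s.1 then s.2 + 1 else s.2)) (prev, t))
          = ((b :: tl).foldl (fun (s : Int × Int) cur => (cur, if cur ≠ s.1 then s.2 + 1 else s.2)) (a, if a ≠ prev then t + 1 else t)) := rfl
      rw [step, ih b a (if a ≠ prev then t + 1 else t)]
      simp only [fvRuns]
      split_ifs <;> simp_all <;> ring

theorem find_variations_spec : Claim_equal_find_variations := by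
  intro xs _ hpre
  unfold Spec_find_variations find_variations find_variations_alt
  cases xs with
  | nil => exact absurd rfl hpre
  | cons a rest =>
      simp only [PySem.List.pyGet?_neg_one, PySem.List.pyGet?_zero_cons, Option.getD_some]
      rw [fv_fold_eq]
      ring
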